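-- pv_equiv track=rewrite | github.com/rotwem/ex5 | mycheck.py | search_down
-- ===== SOURCE A (Python) =====
-- def count_word_in_string(word, search_in):
--     """receives a word and a string and returns the number of appearances of the word in the string"""
--     # This is a big change
--     count = 1
--     new_search = search_in[search_in.find(word) + len(word) - 1:]
--     while len(word) <= len(new_search):
--         if word in new_search:
--             count += 1
--             new_search = new_search[new_search.find(word) + len(word) - 1:]
--         else:
--             new_search = ""
--     return count
--
-- def search_down(wordlist, matrix):
--     counts = dict()
--     for col in range(len(matrix[0])):
--         search_in = ""
--         for row in range(len(matrix)):
--             search_in += matrix[row][col]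
--         for word in wordlist:
--             if word in search_in:
--                 count = count_word_in_string(word, search_in)
--                 if word in counts:
--                     counts[word] += count
--                 else:
--                     counts[word] = count
--     return counts
-- ===== SOURCE B (Python) =====
-- def _count_overlap(word, s):
--     """Greedy left-to-right count of `word` in `s`, where after a match the
--     scan resumes at the last character of that match (one-char overlap)."""
--     L = len(word)
--     n = 0
--     i = 0
--     while i + L <= len(s):
--         if s[i:i + L] == word:
--             n += 1
--             i += L - 1
--         else:
--             i += 1
--     return n
--
-- def search_down(wordlist, matrix):
--     width = len(matrix[0])
--     columns = ["".join(row[c] for row in matrix) for c in range(width)]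
--     counts = {}
--     for column in columns:
--         for word in wordlist:
--             n = _count_overlap(word, column)
--             if n:
--                 counts[word] = counts.get(word, 0) + n
--     return counts
-- ===== Notes on version B (the rewrite author's own statement) =====
-- stated objective: alternative
-- what changed: B counts each word with a single index-based greedy scan (one cursor stepping through the column string, jumping len-1 on a match) instead of A's repeated find + suffix-slicing rescans, assembles every column string with a join over the rows, and merges counts with one unconditional dict.get-based update instead of A's contains-branch.
import Mathlib
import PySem

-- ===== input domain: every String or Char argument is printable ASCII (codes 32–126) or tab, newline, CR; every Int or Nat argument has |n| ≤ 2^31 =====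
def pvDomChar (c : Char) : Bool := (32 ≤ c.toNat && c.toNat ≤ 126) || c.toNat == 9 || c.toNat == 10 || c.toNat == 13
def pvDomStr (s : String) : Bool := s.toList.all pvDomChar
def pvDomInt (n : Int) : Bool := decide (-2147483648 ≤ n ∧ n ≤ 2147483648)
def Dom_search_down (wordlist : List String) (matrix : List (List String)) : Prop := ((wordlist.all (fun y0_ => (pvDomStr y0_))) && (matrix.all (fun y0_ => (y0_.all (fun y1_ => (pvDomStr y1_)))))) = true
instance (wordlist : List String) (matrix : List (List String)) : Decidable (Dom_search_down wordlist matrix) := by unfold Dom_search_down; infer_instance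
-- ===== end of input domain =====

-- B replaces A's per-word rescan (repeated `find` + suffix slicing) with a single
-- index-based greedy scan per word, and assembles all column strings once with join;
-- objective: alternative (same asymptotic cost, no repeated slice copies).

-- ===== PORT A =====
-- the while-loop of count_word_in_string; fuel (length of the scanned string + 2) only
-- makes the recursion total: inside Pre_ it is never exhausted (the Python loop diverges
-- exactly where it would be)
def cwsLoop (word : String) : Nat → Int → String → Int
  | 0, count, _ => count
  | fuel+1, count, newSearch =>
    if PySem.Str.len word ≤ PySem.Str.len newSearch then
      if PySem.Str.isIn word newSearch then
        cwsLoop word fuel (count + 1)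
          (PySem.Str.slice newSearch (some (PySem.Str.find newSearch word + PySem.Str.len word - 1)) none)
      else
        cwsLoop word fuel count ""
    else count

def count_word_in_string (word searchIn : String) : Int :=
  cwsLoop word (searchIn.toList.length + 2) 1
    (PySem.Str.slice searchIn (some (PySem.Str.find searchIn word + PySem.Str.len word - 1)) none)

def search_down (wordlist : List String) (matrix : List (List String)) : List (String × Int) :=
  ((PySem.List.pyRange 0 (PySem.List.len (PySem.List.pyGetD matrix 0 []))).foldl
    (fun counts col =>
      let searchIn : String :=
        (PySem.List.pyRange 0 (PySem.List.len matrix)).foldl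
          (fun s row => s ++ PySem.List.pyGetD (PySem.List.pyGetD matrix row []) col "") ""
      wordlist.foldl (fun counts word =>
        if PySem.Str.isIn word searchIn then
          let count := count_word_in_string word searchIn
          if counts.contains word then counts.insert word (counts.getD word 0 + count)
          else counts.insert word count
        else counts) counts)
    PySem.Dict.empty).items

-- ===== PORT B =====
-- the while-loop of _count_overlap; fuel only makes it total (see cwsLoop)
def countOverlapLoop (word s : String) : Nat → Int → Int → Int
  | 0, _, n => n
  | fuel+1, i, n =>
    if i + PySem.Str.len word ≤ PySem.Str.len s then
      if PySem.Str.slice s (some i) (some (i + PySem.Str.len word)) == word then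
        countOverlapLoop word s fuel (i + PySem.Str.len word - 1) (n + 1)
      else countOverlapLoop word s fuel (i + 1) n
    else n

def count_overlap (word s : String) : Int :=
  countOverlapLoop word s (s.toList.length + 2) 0 0

def search_down_alt (wordlist : List String) (matrix : List (List String)) : List (String × Int) :=
  let width : Int := PySem.List.len (PySem.List.pyGetD matrix 0 [])
  let columns : List String := (PySem.List.pyRange 0 width).map (fun c =>
      PySem.Str.join "" (matrix.map (fun row => PySem.List.pyGetD row c "")))
  (columns.foldl (fun counts column =>
      wordlist.foldl (fun counts word =>
        let n := count_overlap word column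
        if n ≠ 0 then counts.insert word (counts.getD word 0 + n) else counts) counts)
    PySem.Dict.empty).items

-- ===== PRECONDITION & SPEC =====
-- Pre_ excludes exactly the inputs on which the Python A does not return: it raises
-- IndexError (empty matrix, or a row shorter than the first row) or loops forever
-- (a word of length < 2 occurring in a cell that a column scan reads).
def Pre_search_down (wordlist : List String) (matrix : List (List String)) : Prop :=
  matrix ≠ [] ∧
  (∀ row ∈ matrix, (matrix.headD []).length ≤ row.length) ∧
  (∀ w ∈ wordlist, w.toList.length < 2 →
    ∀ row ∈ matrix, ∀ cell ∈ row.take (matrix.headD []).length, PySem.Str.isIn w cell = false)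

instance (wordlist : List String) (matrix : List (List String)) : Decidable (Pre_search_down wordlist matrix) := by
  unfold Pre_search_down; infer_instance

def pvWitness_search_down : List String × List (List String) := (["ab", "zz"], [["a", "b"], ["b", "a"]])

def Spec_search_down (wordlist : List String) (matrix : List (List String)) (out : List (String × Int)) : Prop := out = search_down_alt wordlist matrix
instance (wordlist : List String) (matrix : List (List String)) (out : List (String × Int)) : Decidable (Spec_search_down wordlist matrix out) := by unfold Spec_search_down; infer_instance

-- ===== CLAIM (what is proved, stated in full; the proofs are below) =====
def Claim_equal_search_down : Prop := ∀ (wordlist : List String) (matrix : List (List String)), Dom_search_down wordlist matrix → Pre_search_down wordlist matrix → Spec_search_down wordlist matrix (search_down wordlist matrix)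

-- ===== LEMMAS AND PROOFS =====

-- the common greedy-count specification, on char lists (fuel-indexed)
def gcount (w : List Char) : Nat → List Char → Nat
  | 0, _ => 0
  | fuel+1, cs =>
    if cs.length < w.length then 0
    else if w <+: cs then 1 + gcount w fuel (cs.drop (w.length - 1))
    else gcount w fuel (cs.drop 1)

def gstar (w cs : List Char) : Nat := gcount w (cs.length + 1) cs

theorem gcount_zero_of_not_infix (w : List Char) (fuel : Nat) :
    ∀ cs : List Char, ¬ w <:+: cs → gcount w fuel cs = 0 := by
  induction fuel with
  | zero => intro cs _; simp [gcount]
  | succ fuel ih =>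
    intro cs h
    simp only [gcount]
    split_ifs with h1 h2
    · rfl
    · exact absurd h2.isInfix h
    · exact ih _ (fun hi => h (hi.trans (List.drop_suffix 1 cs).isInfix))

theorem gcount_fuel (w : List Char) (hL : 2 ≤ w.length) :
    ∀ n f cs, cs.length ≤ n → cs.length + 1 ≤ f → gcount w f cs = gstar w cs := by
  intro n
  induction n with
  | zero =>
    intro f cs hn hf
    have hcs : cs.length = 0 := Nat.le_zero.1 hn
    obtain ⟨f, rfl⟩ : ∃ f', f = f' + 1 := ⟨f - 1, by omega⟩
    simp only [gstar, hcs, gcount]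
    rw [if_pos (by omega), if_pos (by omega)]
  | succ n ih =>
    intro f cs hn hf
    obtain ⟨f, rfl⟩ : ∃ f', f = f' + 1 := ⟨f - 1, by omega⟩
    simp only [gstar, gcount]
    by_cases h1 : cs.length < w.length
    · rw [if_pos h1, if_pos h1]
    · rw [if_neg h1, if_neg h1]
      have hlen : 2 ≤ cs.length := le_trans hL (not_lt.1 h1)
      by_cases h2 : w <+: cs
      · rw [if_pos h2, if_pos h2]
        have hd : (cs.drop (w.length - 1)).length ≤ cs.length - 1 := by
          rw [List.length_drop]; omega
        rw [ih f _ (by omega) (by omega), ih cs.length _ (by omega) (by omega)]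
      · rw [if_neg h2, if_neg h2]
        have hd : (cs.drop 1).length = cs.length - 1 := by rw [List.length_drop]
        rw [ih f _ (by omega) (by omega), ih cs.length _ (by omega) (by omega)]

theorem infix_drop_one {w cs : List Char} (hin : w <:+: cs) (hnp : ¬ w <+: cs) :
    w <:+: cs.drop 1 := by
  have h := (PySem.Chars.exists_prefix_drop_iff_isIn w cs).2 ((PySem.Chars.isIn_iff_infix w cs).2 hin)
  obtain ⟨j, hj⟩ := h
  rcases j with _ | j
  · exact absurd (by simpa using hj) hnp
  · have : w <+: (cs.drop 1).drop j := by
      rwa [List.drop_drop, Nat.add_comm]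
    exact this.isInfix.trans (List.drop_suffix j (cs.drop 1)).isInfix

theorem find_succ {w cs : List Char} (hnp : ¬ w <+: cs) (hin : w <:+: cs.drop 1) :
    (PySem.Chars.find cs w).toNat = (PySem.Chars.find (cs.drop 1) w).toNat + 1 := by
  have hin0 : w <:+: cs := hin.trans (List.drop_suffix 1 cs).isInfix
  have h0 : 0 ≤ PySem.Chars.find cs w := (PySem.Chars.find_nonneg_iff cs w).2 hin0
  have h1 : 0 ≤ PySem.Chars.find (cs.drop 1) w := (PySem.Chars.find_nonneg_iff _ w).2 hin
  obtain ⟨hp0, hm0⟩ := PySem.Chars.find_spec h0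
  obtain ⟨hp1, hm1⟩ := PySem.Chars.find_spec h1
  set k := (PySem.Chars.find cs w).toNat with hk
  set k' := (PySem.Chars.find (cs.drop 1) w).toNat with hk'
  have hkne : k ≠ 0 := by
    intro h; rw [h] at hp0; exact hnp (by simpa using hp0)
  -- k' ≤ k - 1 : prefix at k-1 in drop 1
  have hub : ¬ (k - 1 < k') := by
    intro hlt
    have : w <+: (cs.drop 1).drop (k - 1) := by
      rw [List.drop_drop]
      have h : 1 + (k - 1) = k := by omega
      rw [h]; exact hp0
    exact hm1 _ hlt this
  -- k ≤ k' + 1 : prefix at k'+1 in cs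
  have hlb : ¬ (k' + 1 < k) := by
    intro hlt
    have : w <+: cs.drop (k' + 1) := by
      have h := hp1
      rw [List.drop_drop] at h
      simpa [Nat.add_comm] using h
    exact hm0 _ hlt this
  omega

theorem find_toNat_zero_of_prefix {w cs : List Char} (hp : w <+: cs) :
    (PySem.Chars.find cs w).toNat = 0 := by
  have h0 : 0 ≤ PySem.Chars.find cs w := (PySem.Chars.find_nonneg_iff cs w).2 hp.isInfix
  obtain ⟨-, hm⟩ := PySem.Chars.find_spec h0
  by_contra hne
  exact hm 0 (by omega) (by simpa using hp)

theorem gcount_jump (w : List Char) (hL : 2 ≤ w.length) :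
    ∀ n cs, cs.length ≤ n → w <:+: cs →
      gstar w cs = 1 + gstar w (cs.drop ((PySem.Chars.find cs w).toNat + w.length - 1)) := by
  intro n
  induction n with
  | zero =>
    intro cs hn hin
    have := hin.length_le
    omega
  | succ n ih =>
    intro cs hn hin
    have hlen : w.length ≤ cs.length := hin.length_le
    by_cases hp : w <+: cs
    · rw [find_toNat_zero_of_prefix hp]
      have h1 : gstar w cs = 1 + gcount w cs.length (cs.drop (w.length - 1)) := by
        show gcount w (cs.length + 1) cs = _
        rw [gcount, if_neg (by omega), if_pos hp]
      rw [h1, gcount_fuel w hL cs.length _ _ (by rw [List.length_drop]; omega) (by rw [List.length_drop]; omega)]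
      norm_num
    · have hin1 : w <:+: cs.drop 1 := infix_drop_one hin hp
      have hfs := find_succ hp hin1
      have step : gstar w cs = gstar w (cs.drop 1) := by
        show gcount w (cs.length + 1) cs = _
        rw [gcount, if_neg (by omega), if_neg hp]
        rw [gcount_fuel w hL cs.length _ _ (by rw [List.length_drop]; omega) (by rw [List.length_drop]; omega)]
      rw [step, ih _ (by rw [List.length_drop]; omega) hin1, hfs]
      congr 2
      rw [List.drop_drop]
      congr 1
      omega

theorem bloop_eq (w s : String) (hL : 1 ≤ w.toList.length) :
    ∀ fuel (i : Nat) (n : Int),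
      countOverlapLoop w s fuel (i : Int) n = n + (gcount w.toList fuel (s.toList.drop i) : Int) := by
  intro fuel
  induction fuel with
  | zero => intro i n; simp [countOverlapLoop, gcount]
  | succ fuel ih =>
    intro i n
    simp only [countOverlapLoop, gcount, PySem.Str.len_eq]
    by_cases hg : i + w.toList.length ≤ s.toList.length
    · rw [if_pos (show (i : Int) + (w.toList.length : Int) ≤ (s.toList.length : Int) by omega),
        if_neg (show ¬((s.toList.drop i).length < w.toList.length) by rw [List.length_drop]; omega)]
      have hcast : (i : Int) + (w.toList.length : Int) = ((i + w.toList.length : Nat) : Int) := by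
        push_cast; ring
      have harg : i + w.toList.length - i = w.toList.length := by omega
      have hcond : ((PySem.Str.slice s (some (i : Int)) (some ((i : Int) + (w.toList.length : Int))) == w) = true)
          ↔ w.toList <+: s.toList.drop i := by
        rw [beq_iff_eq, ← String.toList_inj, PySem.Str.toList_slice, PySem.Chars.slice_eq_listSlice,
          hcast, PySem.List.slice_natCast, harg]
        rw [List.prefix_iff_eq_take, eq_comm]
      simp only [hcond]
      by_cases hpre : w.toList <+: s.toList.drop i
      · rw [if_pos hpre, if_pos hpre]
        have hstep : (i : Int) + (w.toList.length : Int) - 1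
            = ((i + w.toList.length - 1 : Nat) : Int) := by
          push_cast [Nat.cast_sub (by omega : 1 ≤ i + w.toList.length)]; ring
        rw [hstep, ih (i + w.toList.length - 1) (n + 1), List.drop_drop]
        have harg2 : i + (w.toList.length - 1) = i + w.toList.length - 1 := by omega
        rw [harg2]
        push_cast
        ring
      · rw [if_neg hpre, if_neg hpre]
        have hone : (i : Int) + 1 = ((i + 1 : Nat) : Int) := by push_cast; ring
        rw [hone, ih (i + 1) n, List.drop_drop]
    · rw [if_neg (show ¬((i : Int) + (w.toList.length : Int) ≤ (s.toList.length : Int)) by omega),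
        if_pos (show (s.toList.drop i).length < w.toList.length by rw [List.length_drop]; omega)]
      norm_num

theorem count_overlap_eq (w s : String) (hL : 1 ≤ w.toList.length) :
    count_overlap w s = (gcount w.toList (s.toList.length + 2) s.toList : Int) := by
  have h := bloop_eq w s hL (s.toList.length + 2) 0 0
  simpa using h

theorem aloop_eq (w : String) (hL : 2 ≤ w.toList.length) :
    ∀ fuel (t : String) (c : Int), t.toList.length + 1 ≤ fuel →
      cwsLoop w fuel c t = c + (gstar w.toList t.toList : Int) := by
  intro fuel
  induction fuel with
  | zero => intro t c h; exact absurd h (by omega)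
  | succ fuel ih =>
    intro t c hfuel
    simp only [cwsLoop, PySem.Str.len_eq]
    by_cases hg : w.toList.length ≤ t.toList.length
    · rw [if_pos (by exact_mod_cast hg)]
      by_cases hin : w.toList <:+: t.toList
      · have hisin : PySem.Str.isIn w t = true := by
          rw [PySem.Str.isIn_eq]; exact (PySem.Chars.isIn_iff_infix _ _).2 hin
        rw [hisin, if_pos rfl]
        have hf0 : 0 ≤ PySem.Chars.find t.toList w.toList := (PySem.Chars.find_nonneg_iff _ _).2 hin
        set k := (PySem.Chars.find t.toList w.toList).toNat with hk
        have htl : (PySem.Str.slice t (some (PySem.Str.find t w + (w.toList.length : Int) - 1)) none).toList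
            = t.toList.drop (k + w.toList.length - 1) := by
          rw [PySem.Str.toList_slice, PySem.Chars.slice_eq_listSlice, PySem.Str.find_eq,
            PySem.List.slice_from _ (by omega)]
          congr 1
          omega
        rw [ih _ (c + 1) (by rw [htl, List.length_drop]; omega), htl,
          gcount_jump w.toList hL t.toList.length t.toList le_rfl hin]
        push_cast
        ring
      · have hisin : PySem.Str.isIn w t = false := by
          rw [PySem.Str.isIn_eq]; exact (PySem.Chars.isIn_eq_false_iff _ _).2 hin
        rw [hisin, if_neg (by simp)]
        rw [ih "" c (by have h0 : ("".toList).length = 0 := rfl; omega)]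
        have e1 : gstar w.toList ("".toList) = 0 := by
          apply gcount_zero_of_not_infix
          intro h
          have hle := h.length_le
          have h0 : ("".toList).length = 0 := rfl
          omega
        have e2 : gstar w.toList t.toList = 0 := gcount_zero_of_not_infix _ _ _ hin
        rw [e1, e2]
    · rw [if_neg (by intro h; exact hg (by exact_mod_cast h))]
      have e : gstar w.toList t.toList = 0 := by
        show gcount w.toList (t.toList.length + 1) t.toList = 0
        rw [gcount, if_pos (by omega)]
      rw [e]
      simp

theorem count_word_eq (w s : String) (hL : 2 ≤ w.toList.length)
    (hin : w.toList <:+: s.toList) :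
    count_word_in_string w s = (gstar w.toList s.toList : Int) := by
  unfold count_word_in_string
  have hf0 : 0 ≤ PySem.Chars.find s.toList w.toList := (PySem.Chars.find_nonneg_iff _ _).2 hin
  set k := (PySem.Chars.find s.toList w.toList).toNat with hk
  have htl : (PySem.Str.slice s (some (PySem.Str.find s w + PySem.Str.len w - 1)) none).toList
      = s.toList.drop (k + w.toList.length - 1) := by
    rw [PySem.Str.toList_slice, PySem.Chars.slice_eq_listSlice, PySem.Str.find_eq,
      PySem.Str.len_eq, PySem.List.slice_from _ (by omega)]
    congr 1
    omega
  rw [aloop_eq w hL _ _ 1 (by rw [htl, List.length_drop]; omega), htl,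
    gcount_jump w.toList hL s.toList.length s.toList le_rfl hin]
  push_cast
  ring

theorem join_empty_sep : ∀ parts : List (List Char), PySem.Chars.join [] parts = parts.flatten
  | [] => by simp [PySem.Chars.join_nil]
  | [p] => by simp [PySem.Chars.join_singleton]
  | p :: q :: rest => by
    rw [PySem.Chars.join_cons_cons, join_empty_sep (q :: rest)]
    simp

-- per-(word, column-string) equality of the two dict updates
theorem inner_fold_eq (wordlist : List String) (col : String)
    (hw : ∀ w ∈ wordlist, 2 ≤ w.toList.length ∨ (1 ≤ w.toList.length ∧ ¬ w.toList <:+: col.toList)) :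
    ∀ counts : PySem.Dict String Int,
      wordlist.foldl (fun counts word =>
        if PySem.Str.isIn word col then
          let count := count_word_in_string word col
          if counts.contains word then counts.insert word (counts.getD word 0 + count)
          else counts.insert word count
        else counts) counts
      = wordlist.foldl (fun counts word =>
          let n := count_overlap word col
          if n ≠ 0 then counts.insert word (counts.getD word 0 + n) else counts) counts := by
  intro counts
  apply PySem.List.foldl_congr_mem
  intro d w hwmem
  rcases hw w hwmem with hL2 | ⟨hL1, hnin⟩
  · by_cases hin : w.toList <:+: col.toList
    · have hisin : PySem.Str.isIn w col = true := by
        rw [PySem.Str.isIn_eq]; exact (PySem.Chars.isIn_iff_infix _ _).2 hin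
      have hcwe : count_word_in_string w col = (gstar w.toList col.toList : Int) :=
        count_word_eq w col hL2 hin
      have hcoe : count_overlap w col = (gstar w.toList col.toList : Int) := by
        rw [count_overlap_eq w col (by omega),
          gcount_fuel w.toList hL2 col.toList.length _ _ le_rfl (by omega)]
      have hpos : (gstar w.toList col.toList : Int) ≠ 0 := by
        rw [gcount_jump w.toList hL2 col.toList.length col.toList le_rfl hin]
        push_cast
        omega
      rw [if_pos hisin]
      simp only [hcwe, hcoe]
      rw [if_pos hpos]
      by_cases hc : d.contains w = true
      · rw [if_pos hc]
      · have hcf : d.contains w = false := by simpa using hc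
        rw [if_neg hc, PySem.Dict.getD_of_not_contains d 0 hcf, zero_add]
    · have hisin : PySem.Str.isIn w col = false := by
        rw [PySem.Str.isIn_eq]; exact (PySem.Chars.isIn_eq_false_iff _ _).2 hin
      have hcoe : count_overlap w col = 0 := by
        rw [count_overlap_eq w col (by omega), gcount_zero_of_not_infix _ _ _ hin]
        simp
      simp only [hcoe]
      rw [if_neg (show ¬(PySem.Str.isIn w col = true) by rw [hisin]; simp), if_neg (by simp)]
  · have hisin : PySem.Str.isIn w col = false := by
      rw [PySem.Str.isIn_eq]; exact (PySem.Chars.isIn_eq_false_iff _ _).2 hnin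
    have hcoe : count_overlap w col = 0 := by
      rw [count_overlap_eq w col hL1, gcount_zero_of_not_infix _ _ _ hnin]
      simp
    simp only [hcoe]
    rw [if_neg (show ¬(PySem.Str.isIn w col = true) by rw [hisin]; simp), if_neg (by simp)]

-- A's row-by-row string assembly for one column equals B's join over the same column
theorem colstr_eq (matrix : List (List String)) (c : Int) :
    (PySem.List.pyRange 0 (PySem.List.len matrix)).foldl
        (fun s row => s ++ PySem.List.pyGetD (PySem.List.pyGetD matrix row []) c "") ""
      = PySem.Str.join "" (matrix.map (fun row => PySem.List.pyGetD row c "")) := by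
  rw [PySem.List.foldl_pyRange_pyGetD matrix [] (fun s row => s ++ PySem.List.pyGetD row c "") "" le_rfl]
  rw [← String.toList_inj, PySem.Str.toList_join,
    show "".toList = ([] : List Char) from rfl, join_empty_sep]
  have key : ∀ (l : List (List String)) (init : String),
      (l.foldl (fun s row => s ++ PySem.List.pyGetD row c "") init).toList
        = init.toList ++ (l.map (fun row => (PySem.List.pyGetD row c "").toList)).flatten := by
    intro l
    induction l with
    | nil => intro init; simp
    | cons r rs ih =>
      intro init
      simp only [List.foldl_cons, List.map_cons, List.flatten_cons, ih, String.toList_append]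
      simp [List.append_assoc]
  simp only [Int.toNat_zero, List.drop_zero, key, List.map_map]
  rfl

-- ===== VERDICT (by name: the statement is the Claim_ definition above) =====
theorem search_down_spec : Claim_equal_search_down := by
  intro wordlist matrix _hdom hpre
  obtain ⟨hne, hrows, hshort⟩ := hpre
  unfold Spec_search_down search_down search_down_alt
  simp only [List.foldl_map]
  -- the first row, as read by both ports
  have hrow0 : PySem.List.pyGetD matrix 0 [] = matrix.headD [] := by
    cases matrix with
    | nil => exact absurd rfl hne
    | cons r rs =>
      rw [PySem.List.pyGetD_eq_getElem _ _ (by norm_num) (by simp)]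
      rfl
  congr 1
  apply PySem.List.foldl_congr_mem
  intro counts c hc
  obtain ⟨hc0, hcW⟩ := (PySem.List.mem_pyRange_one).1 hc
  have hlenW : PySem.List.len (matrix.headD []) = (((matrix.headD []).length : Nat) : Int) := by
    simp [PySem.List.len]
  rw [hrow0, hlenW] at hcW
  rw [colstr_eq matrix c]
  set col := PySem.Str.join "" (matrix.map (fun row => PySem.List.pyGetD row c "")) with hcol
  have hheadmem : matrix.headD [] ∈ matrix := by
    cases matrix with
    | nil => exact absurd rfl hne
    | cons r rs => exact List.mem_cons_self ..
  -- every cell that some column scan reads is inside its row's take-prefix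
  have hcellmem : ∀ row ∈ matrix, PySem.List.pyGetD row c "" ∈ row.take (matrix.headD []).length := by
    intro row hrow
    have hlen : (matrix.headD []).length ≤ row.length := hrows row hrow
    have hcl : c < (row.length : Int) := by omega
    rw [PySem.List.pyGetD_eq_getElem _ _ hc0 hcl]
    have hidx : c.toNat < (matrix.headD []).length := by omega
    have heq : (row.take (matrix.headD []).length)[c.toNat]'(by rw [List.length_take]; omega)
        = row[c.toNat]'(by omega) := List.getElem_take
    rw [← heq]
    exact List.getElem_mem _
  refine inner_fold_eq wordlist col ?_ counts
  intro w hwmem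
  by_cases h2 : 2 ≤ w.toList.length
  · exact Or.inl h2
  · have hfact := hshort w hwmem (by omega)
    have hL1 : 1 ≤ w.toList.length := by
      by_contra h0
      have hwnil : w.toList = [] := by
        have : w.toList.length = 0 := by omega
        exact List.eq_nil_of_length_eq_zero this
      have hiff := hfact _ hheadmem _ (hcellmem _ hheadmem)
      rw [PySem.Str.isIn_eq, hwnil, PySem.Chars.isIn_nil] at hiff
      simp at hiff
    refine Or.inr ⟨hL1, ?_⟩
    intro hinf
    have hcolL : col.toList = (matrix.map (fun row => (PySem.List.pyGetD row c "").toList)).flatten := by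
      rw [hcol, PySem.Str.toList_join, show "".toList = ([] : List Char) from rfl, join_empty_sep,
        List.map_map]
      rfl
    obtain ⟨ch, hch⟩ := List.length_eq_one_iff.1 (by omega : w.toList.length = 1)
    rw [hch, hcolL] at hinf
    have hchmem := (List.singleton_infix_iff ..).1 hinf
    obtain ⟨part, hpmem, hchin⟩ := List.mem_flatten.1 hchmem
    obtain ⟨row, hrowm, rfl⟩ := List.mem_map.1 hpmem
    have hfalse := hfact row hrowm _ (hcellmem row hrowm)
    rw [PySem.Str.isIn_eq, hch] at hfalse
    have htrue : PySem.Chars.isIn [ch] (PySem.List.pyGetD row c "").toList = true :=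
      (PySem.Chars.isIn_iff_infix _ _).2 ((List.singleton_infix_iff ..).2 hchin)
    rw [htrue] at hfalse
    simp at hfalse
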